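-- pv_equiv track=rewrite | github.com/jason-riddle/ledger-main | scripts/ledger/organize_includes.py | organize_text
-- ===== SOURCE A (Python) =====
-- def is_section_header(line: str) -> bool:
--     """Return True if a line is a section header."""
--     return line.startswith("; ") and not line.startswith(";;")
--
-- def organize_text(text: str) -> str:
--     """Return organized text with sorted sections and lines."""
--     lines = text.splitlines()
--     section_indices = [idx for idx, line in enumerate(lines) if is_section_header(line)]
--     if not section_indices:
--         return text if text.endswith("\n") else text + "\n"
--
--     preamble = lines[: section_indices[0]]
--     sections: list[tuple[str, list[str]]] = []
--
--     for i, start in enumerate(section_indices):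
--         end = section_indices[i + 1] if i + 1 < len(section_indices) else len(lines)
--         header = lines[start]
--         body = [line for line in lines[start + 1 : end] if line.strip()]
--         sections.append((header, sorted(body)))
--
--     sections.sort(key=lambda item: item[0][2:].strip())
--
--     output_lines: list[str] = []
--     output_lines.extend(preamble)
--     for header, body in sections:
--         output_lines.append(header)
--         output_lines.extend(body)
--         output_lines.append("")
--
--     while output_lines and output_lines[-1] == "":
--         output_lines.pop()
--
--     return "\n".join(output_lines) + "\n"
-- ===== SOURCE B (Python) =====
-- def organize_text(text: str) -> str:
--     """Return organized text with sorted sections and lines (single-pass scan)."""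
--     preamble: list[str] = []
--     sections: list[tuple[str, list[str]]] = []
--     current = None
--     for line in text.splitlines():
--         if line.startswith("; ") and not line.startswith(";;"):
--             if current is not None:
--                 sections.append(current)
--             current = (line, [])
--         elif current is None:
--             preamble.append(line)
--         elif line.strip():
--             current[1].append(line)
--     if current is None:
--         return text if text.endswith("\n") else text + "\n"
--     sections.append(current)
--     sections.sort(key=lambda s: s[0][2:].strip())
--     out = preamble + [x for h, b in sections for x in [h, *sorted(b), ""]]
--     while out and out[-1] == "":
--         out.pop()
--     return "\n".join(out) + "\n"
-- ===== Notes on version B (the rewrite author's own statement) =====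
-- stated objective: alternative
-- what changed: Replaced the collect-header-indices-then-slice construction by a single linear pass that accumulates preamble, finished sections and the current section while scanning, emitting the result with one flat comprehension.
import Mathlib
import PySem

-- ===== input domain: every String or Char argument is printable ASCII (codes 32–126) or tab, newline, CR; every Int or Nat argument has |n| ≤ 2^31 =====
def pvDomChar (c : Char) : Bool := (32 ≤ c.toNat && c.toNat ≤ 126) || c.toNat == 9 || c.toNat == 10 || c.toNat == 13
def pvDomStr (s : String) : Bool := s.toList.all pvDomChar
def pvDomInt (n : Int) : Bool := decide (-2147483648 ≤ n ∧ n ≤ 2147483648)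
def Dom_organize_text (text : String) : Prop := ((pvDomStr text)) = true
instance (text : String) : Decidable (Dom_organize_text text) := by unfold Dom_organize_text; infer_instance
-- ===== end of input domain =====

-- B replaces A's collect-header-indices-then-slice construction by a single linear scan
-- (preamble / finished sections / current section accumulators); same result, similar cost.

-- ===== PORT A =====
def is_section_header (line : String) : Bool :=
  PySem.Str.startswith line "; " && !(PySem.Str.startswith line ";;")

-- port of A's 'while output_lines and output_lines[-1] == "": output_lines.pop()'
-- as the obvious structural recursion removing trailing empty strings
def popTrailing : List String → List String
  | [] => []
  | x :: xs =>
    match popTrailing xs with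
    | [] => if x == "" then [] else [x]
    | ys => x :: ys

def organize_text (text : String) : String :=
  let lines := PySem.Str.splitlines text
  let section_indices :=
    ((PySem.List.enumerate lines 0).filter (fun p => is_section_header p.2)).map (fun p => p.1)
  match section_indices with
  | [] => if PySem.Str.endswith text "\n" then text else text ++ "\n"
  | i0 :: _ =>
    let preamble := PySem.List.slice lines none (some i0)
    let sections := (PySem.List.enumerate section_indices 0).foldl
      (fun (acc : List (String × List String)) p =>
        let e : Int := if p.1 + 1 < (section_indices.length : Int)
                       then PySem.List.pyGetD section_indices (p.1 + 1) 0
                       else (lines.length : Int)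
        let header := PySem.List.pyGetD lines p.2 ""
        let body := (PySem.List.slice lines (some (p.2 + 1)) (some e)).filter
                      (fun line => !(PySem.Str.strip line == ""))
        acc ++ [(header, PySem.List.sorted body (fun x => x) false)]) []
    let sections := PySem.List.sorted sections
      (fun item => PySem.Str.strip (PySem.Str.slice item.1 (some 2) none)) false
    let output_lines := preamble
    let output_lines := sections.foldl (fun acc hb => acc ++ [hb.1] ++ hb.2 ++ [""]) output_lines
    let output_lines := popTrailing output_lines
    PySem.Str.join "\n" output_lines ++ "\n"

-- ===== PORT B =====
-- state: (preamble, finished sections, current section)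
def ot_step (st : List String × List (String × List String) × Option (String × List String))
    (line : String) : List String × List (String × List String) × Option (String × List String) :=
  if is_section_header line then
    (st.1, (match st.2.2 with | some c => st.2.1 ++ [c] | none => st.2.1), some (line, []))
  else
    match st.2.2 with
    | none => (st.1 ++ [line], st.2.1, none)
    | some c =>
      (st.1, st.2.1,
       some (c.1, if !(PySem.Str.strip line == "") then c.2 ++ [line] else c.2))

def organize_text_alt (text : String) : String :=
  let st := (PySem.Str.splitlines text).foldl ot_step ([], [], none)
  match st.2.2 with
  | none => if PySem.Str.endswith text "\n" then text else text ++ "\n"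
  | some c =>
    let ordered := PySem.List.sorted (st.2.1 ++ [c])
      (fun s => PySem.Str.strip (PySem.Str.slice s.1 (some 2) none)) false
    let out := st.1 ++
      ordered.flatMap (fun s => s.1 :: (PySem.List.sorted s.2 (fun x => x) false ++ [""]))
    PySem.Str.join "\n" (popTrailing out) ++ "\n"

-- ===== PRECONDITION & SPEC =====
def Spec_organize_text (text : String) (out : String) : Prop := out = organize_text_alt text
instance (text : String) (out : String) : Decidable (Spec_organize_text text out) := by unfold Spec_organize_text; infer_instance

-- ===== CLAIM (what is proved, stated in full; the proofs are below) =====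
def Claim_equal_organize_text : Prop := ∀ (text : String), Dom_organize_text text → Spec_organize_text text (organize_text text)

-- ===== LEMMAS AND PROOFS =====

-- proof-side characterisation of the section structure of a line list
def nonblank (line : String) : Bool := !(PySem.Str.strip line == "")

def parsePre : List String → List String
  | [] => []
  | l :: ls => if is_section_header l then [] else l :: parsePre ls

def parseSecs : List String → List (String × List String)
  | [] => []
  | l :: ls =>
    if is_section_header l then (l, (parsePre ls).filter nonblank) :: parseSecs ls
    else parseSecs ls

-- ---- B-side: the fold computes parsePre / parseSecs ----

def otFlat (st : List String × List (String × List String) × Option (String × List String)) :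
    List String × List (String × List String) × Bool :=
  (st.1, st.2.1 ++ st.2.2.toList, st.2.2.isSome)

theorem fold_flat_some (ls : List String) : ∀ (pre : List String)
    (secs : List (String × List String)) (h : String) (b : List String),
    otFlat (ls.foldl ot_step (pre, secs, some (h, b)))
      = (pre, secs ++ (h, b ++ (parsePre ls).filter nonblank) :: parseSecs ls, true) := by
  induction ls with
  | nil => intro pre secs h b; simp [otFlat, parsePre, parseSecs]
  | cons l ls ih =>
    intro pre secs h b
    by_cases hl : is_section_header l = true
    · rw [List.foldl_cons]
      rw [show ot_step (pre, secs, some (h, b)) l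
            = (pre, secs ++ [(h, b)], some (l, [])) by simp [ot_step, hl]]
      rw [ih]
      simp [parsePre, parseSecs, hl]
    · rw [List.foldl_cons]
      rw [show ot_step (pre, secs, some (h, b)) l
            = (pre, secs, some (h, if !(PySem.Str.strip l == "") then b ++ [l] else b)) by
          simp [ot_step, hl]]
      rw [ih]
      by_cases hb : nonblank l = true
      · simp only [nonblank] at hb
        simp [parsePre, parseSecs, hl, hb, nonblank]
      · simp only [nonblank] at hb
        simp only [Bool.not_eq_true] at hb
        simp [parsePre, parseSecs, hl, hb, nonblank]

theorem fold_flat_none (ls : List String) : ∀ (pre : List String)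
    (secs : List (String × List String)),
    otFlat (ls.foldl ot_step (pre, secs, none))
      = (pre ++ parsePre ls, secs ++ parseSecs ls, !(parseSecs ls).isEmpty) := by
  induction ls with
  | nil => intro pre secs; simp [otFlat, parsePre, parseSecs]
  | cons l ls ih =>
    intro pre secs
    by_cases hl : is_section_header l = true
    · rw [List.foldl_cons]
      rw [show ot_step (pre, secs, none) l = (pre, secs, some (l, [])) by simp [ot_step, hl]]
      rw [fold_flat_some]
      simp [parsePre, parseSecs, hl]
    · rw [List.foldl_cons]
      rw [show ot_step (pre, secs, none) l = (pre ++ [l], secs, none) by simp [ot_step, hl]]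
      rw [ih]
      simp [parsePre, parseSecs, hl]

-- ---- A-side: indices, slices ----

def hIdx (ls : List String) (s : Int) : List Int :=
  ((PySem.List.enumerate ls s).filter (fun p => is_section_header p.2)).map (fun p => p.1)

theorem hIdx_cons (l : String) (ls : List String) (s : Int) :
    hIdx (l :: ls) s = (if is_section_header l then [s] else []) ++ hIdx ls (s + 1) := by
  by_cases hl : is_section_header l = true <;>
    simp [hIdx, PySem.List.enumerate_cons, hl]

theorem enumerate_shift {α : Type} (ls : List α) : ∀ (s : Int),
    PySem.List.enumerate ls s = (PySem.List.enumerate ls 0).map (fun p => (p.1 + s, p.2)) := by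
  induction ls with
  | nil => intro s; simp [PySem.List.enumerate_nil]
  | cons x t ih =>
    intro s
    rw [PySem.List.enumerate_cons, PySem.List.enumerate_cons, ih (s + 1), ih (0 + 1)]
    simp only [List.map_cons, List.map_map, zero_add]
    congr 1
    exact List.map_congr_left fun p _ => by
      simp only [Function.comp_apply]
      exact congrArg (fun z => (z, p.2)) (by ring)

theorem hIdx_shift (ls : List String) (s : Int) :
    hIdx ls s = (hIdx ls 0).map (· + s) := by
  unfold hIdx
  rw [enumerate_shift ls s, List.filter_map, List.map_map, List.map_map]
  rfl

theorem hIdx_nonneg (ls : List String) (x : Int) (hx : x ∈ hIdx ls 0) : 0 ≤ x := by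
  unfold hIdx at hx
  simp only [List.mem_map, List.mem_filter] at hx
  obtain ⟨p, ⟨hp, -⟩, rfl⟩ := hx
  rw [PySem.List.mem_enumerate_iff] at hp
  obtain ⟨k, hk, rfl⟩ := hp
  simp

theorem hIdx_nil_iff (ls : List String) : hIdx ls 0 = [] ↔ parseSecs ls = [] := by
  induction ls with
  | nil => simp [hIdx, PySem.List.enumerate_nil, parseSecs]
  | cons l ls ih =>
    rw [hIdx_cons, show (0 : Int) + 1 = 1 by ring, hIdx_shift ls 1]
    by_cases hl : is_section_header l = true <;>
      simp [parseSecs, hl, ih]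

theorem parsePre_of_no_secs (ls : List String) (h : parseSecs ls = []) : parsePre ls = ls := by
  induction ls with
  | nil => rfl
  | cons l ls ih =>
    by_cases hl : is_section_header l = true
    · rw [parseSecs, if_pos hl] at h; exact absurd h (by simp)
    · rw [parseSecs, if_neg hl] at h
      rw [parsePre, if_neg hl, ih h]

theorem slice_hIdx_head (ls : List String) : ∀ (i : Int) (r : List Int),
    hIdx ls 0 = i :: r → PySem.List.slice ls none (some i) = parsePre ls := by
  induction ls with
  | nil => intro i r h; simp [hIdx, PySem.List.enumerate_nil] at h
  | cons l ls ih =>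
    intro i r h
    rw [hIdx_cons, show (0 : Int) + 1 = 1 by ring, hIdx_shift ls 1] at h
    by_cases hl : is_section_header l = true
    · rw [if_pos hl] at h
      simp only [List.singleton_append, List.cons.injEq] at h
      rw [← h.1, PySem.List.slice_to _ le_rfl]
      simp [parsePre, hl]
    · rw [if_neg hl, List.nil_append] at h
      rcases hi : hIdx ls 0 with _ | ⟨i', r'⟩
      · rw [hi] at h; simp at h
      · rw [hi] at h
        simp only [List.map_cons, List.cons.injEq] at h
        have hnn : 0 ≤ i' := hIdx_nonneg ls i' (by rw [hi]; exact List.mem_cons_self ..)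
        rw [← h.1, PySem.List.slice_to _ (by omega)]
        rw [parsePre, if_neg hl]
        rw [show (i' + 1).toNat = i'.toNat + 1 by omega, List.take_succ_cons]
        rw [← PySem.List.slice_to ls hnn, ih i' r' hi]

-- the A fold's per-element function, abstracted over (start, end)
def secOfA (lines : List String) (q : Int × Int) : String × List String :=
  (PySem.List.pyGetD lines q.1 "",
   PySem.List.sorted ((PySem.List.slice lines (some (q.1 + 1)) (some q.2)).filter nonblank)
     (fun x => x) false)

-- enumerate-with-next-lookup = zip with shifted tail
theorem zipNext {β : Type} (G : Int → Int → β) (L : Int) :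
    ∀ (t : List Int) (pre : List Int) (s : Nat), s = pre.length →
    (PySem.List.enumerate t (s : Int)).map
      (fun p => G p.2 (if p.1 + 1 < ((pre ++ t).length : Int)
                       then PySem.List.pyGetD (pre ++ t) (p.1 + 1) 0
                       else L))
      = (t.zip (t.tail ++ [L])).map (fun q => G q.1 q.2) := by
  intro t
  induction t with
  | nil => intro pre s hs; simp [PySem.List.enumerate_nil]
  | cons x t ih =>
    intro pre s hs
    rw [PySem.List.enumerate_cons, List.map_cons]
    cases t with
    | nil =>
      have hcond : ¬ ((s : Int) + 1 < ((pre ++ [x]).length : Int)) := by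
        simp [hs]
      simp only [PySem.List.enumerate_nil, List.map_nil]
      rw [if_neg (by simp [hs])]
      simp
    | cons y t' =>
      have hre : pre ++ x :: y :: t' = (pre ++ [x]) ++ y :: t' := by simp
      have hcast : (s : Int) + 1 = ((s + 1 : Nat) : Int) := by push_cast; ring
      rw [hre, hcast, ih (pre ++ [x]) (s + 1) (by simp [hs])]
      have hcond : (((s + 1 : Nat) : Int)) < (((pre ++ [x]) ++ y :: t').length : Int) := by
        simp [hs]
      have hy : ((pre ++ [x]) ++ y :: t').getD (s + 1) 0 = y := by
        rw [List.getD_append_right (pre ++ [x]) (y :: t') 0 (s + 1) (by simp [hs])]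
        simp [hs]
      rw [if_pos hcond, PySem.List.pyGetD_natCast, hy]
      simp

theorem zipNext0 {β : Type} (G : Int → Int → β) (L : Int) (t : List Int) :
    (PySem.List.enumerate t 0).map
      (fun p => G p.2 (if p.1 + 1 < (t.length : Int)
                       then PySem.List.pyGetD t (p.1 + 1) 0
                       else L))
      = (t.zip (t.tail ++ [L])).map (fun q => G q.1 q.2) := by
  have h := zipNext G L t [] 0 rfl
  simpa using h

theorem secOfA_shift (l : String) (ls : List String) (a b : Int)
    (h1 : 0 ≤ a) (h2 : 0 ≤ b) :
    secOfA (l :: ls) (a + 1, b + 1) = secOfA ls (a, b) := by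
  obtain ⟨k, rfl⟩ := Int.eq_ofNat_of_zero_le h1
  obtain ⟨e, rfl⟩ := Int.eq_ofNat_of_zero_le h2
  unfold secOfA
  rw [show ((k : Int) + 1) = ((k + 1 : Nat) : Int) by push_cast; ring,
    show ((k + 1 : Nat) : Int) + 1 = ((k + 2 : Nat) : Int) by push_cast; ring,
    show ((e : Int) + 1) = ((e + 1 : Nat) : Int) by push_cast; ring]
  rw [PySem.List.pyGetD_natCast, PySem.List.pyGetD_natCast, List.getD_cons_succ]
  rw [PySem.List.slice_natCast, PySem.List.slice_natCast]
  rw [show List.drop (k + 2) (l :: ls) = List.drop (k + 1) ls from List.drop_succ_cons ..,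
    show e + 1 - (k + 2) = e - (k + 1) by omega]

theorem zip_shift_map (l : String) (ls : List String) :
    (((hIdx ls 0).map (· + 1)).zip (((hIdx ls 0).map (· + 1)).tail
        ++ [((l :: ls).length : Int)])).map (secOfA (l :: ls))
    = ((hIdx ls 0).zip ((hIdx ls 0).tail ++ [(ls.length : Int)])).map (secOfA ls) := by
  rw [show ((l :: ls).length : Int) = (ls.length : Int) + 1 by push_cast [List.length_cons]; ring]
  rw [show ((hIdx ls 0).map (· + 1)).tail = (hIdx ls 0).tail.map (· + 1) by
    cases hIdx ls 0 <;> simp]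
  rw [show (hIdx ls 0).tail.map (· + 1) ++ [(ls.length : Int) + 1]
      = ((hIdx ls 0).tail ++ [(ls.length : Int)]).map (· + 1) by simp]
  rw [List.zip_map, List.map_map]
  apply List.map_congr_left
  rintro ⟨a, b⟩ hq
  obtain ⟨ha, hb⟩ := List.of_mem_zip hq
  have h1 : 0 ≤ a := hIdx_nonneg ls a ha
  have h2 : 0 ≤ b := by
    rcases List.mem_append.mp hb with h | h
    · exact hIdx_nonneg ls b (List.mem_of_mem_tail h)
    · simp only [List.mem_singleton] at h
      exact h ▸ Int.natCast_nonneg _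
  exact secOfA_shift l ls a b h1 h2

theorem secsA (lines : List String) :
    ((hIdx lines 0).zip ((hIdx lines 0).tail ++ [(lines.length : Int)])).map (secOfA lines)
      = (parseSecs lines).map
          (fun s => (s.1, PySem.List.sorted s.2 (fun x => x) false)) := by
  induction lines with
  | nil => simp [hIdx, PySem.List.enumerate_nil, parseSecs]
  | cons l ls ih =>
    rw [hIdx_cons, show (0 : Int) + 1 = 1 by ring, hIdx_shift ls 1]
    by_cases hl : is_section_header l = true
    · rw [if_pos hl]
      have hform : ∀ (X : List Int) (L1 : Int),
          (([(0 : Int)] ++ X).zip (([(0 : Int)] ++ X).tail ++ [L1]))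
            = ((0 : Int), (X ++ [L1]).headD 0) :: X.zip (X.tail ++ [L1]) := by
        intro X L1; cases X <;> simp
      rw [show List.map (fun x => x + 1) (hIdx ls 0) = (hIdx ls 0).map (· + 1) from rfl]
      rw [hform, List.map_cons]
      rw [zip_shift_map l ls, ih]
      have hhead : secOfA (l :: ls)
          (0, (((hIdx ls 0).map (· + 1)) ++ [((l :: ls).length : Int)]).headD 0)
          = (l, PySem.List.sorted ((parsePre ls).filter nonblank) (fun x => x) false) := by
        have hbody : ∀ e0 : Int,
            (((hIdx ls 0).map (· + 1)) ++ [((l :: ls).length : Int)]).headD 0 = e0 →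
            PySem.List.slice (l :: ls) (some (0 + 1)) (some e0) = parsePre ls := by
          intro e0 he0
          cases hm : hIdx ls 0 with
          | nil =>
            rw [hm] at he0
            simp only [List.map_nil, List.nil_append, List.headD_cons] at he0
            have hsecs : parseSecs ls = [] := (hIdx_nil_iff ls).mp hm
            rw [← he0, parsePre_of_no_secs ls hsecs]
            rw [show ((0 : Int) + 1) = ((1 : Nat) : Int) by norm_num,
              show ((l :: ls).length : Int) = ((ls.length + 1 : Nat) : Int) by
                push_cast [List.length_cons]; ring]
            rw [PySem.List.slice_natCast]
            simp
          | cons i1 r =>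
            rw [hm] at he0
            simp only [List.map_cons, List.cons_append, List.headD_cons] at he0
            have h1 : 0 ≤ i1 := hIdx_nonneg ls i1 (by rw [hm]; exact List.mem_cons_self ..)
            obtain ⟨k, rfl⟩ := Int.eq_ofNat_of_zero_le h1
            rw [← he0]
            rw [show ((0 : Int) + 1) = ((1 : Nat) : Int) by norm_num,
              show ((k : Int) + 1) = ((k + 1 : Nat) : Int) by push_cast; ring]
            rw [PySem.List.slice_natCast]
            rw [← slice_hIdx_head ls (k : Int) r hm, PySem.List.slice_to ls (by positivity)]
            simp
        unfold secOfA
        rw [hbody _ rfl, PySem.List.pyGetD_zero_cons]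
      rw [hhead]
      simp [parseSecs, hl]
    · rw [if_neg hl, List.nil_append]
      rw [show List.map (fun x => x + 1) (hIdx ls 0) = (hIdx ls 0).map (· + 1) from rfl]
      rw [zip_shift_map l ls, ih]
      simp [parseSecs, hl]

-- sorting commutes with a map that the key ignores
theorem insertBy_map {α β : Type} (f : α → β) (bf : β → β → Bool) (x : α) :
    ∀ ys : List α, PySem.List.insertBy bf (f x) (ys.map f)
      = (PySem.List.insertBy (fun a b => bf (f a) (f b)) x ys).map f := by
  intro ys
  induction ys with
  | nil => rfl
  | cons y ys ih =>
    rw [List.map_cons]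
    by_cases h : bf (f x) (f y) = true
    · simp [PySem.List.insertBy, h]
    · simp [PySem.List.insertBy, h, ih]

theorem sorted_map {α β κ : Type} [LinearOrder κ] (f : α → β) (k : β → κ) (S : List α) :
    PySem.List.sorted (S.map f) k false
      = (PySem.List.sorted S (fun x => k (f x)) false).map f := by
  rw [PySem.List.sorted_eq_foldl_insertBy, PySem.List.sorted_eq_foldl_insertBy, List.foldl_map]
  suffices h : ∀ (S : List α) (acc : List α),
      S.foldl (fun acc x => PySem.List.insertBy (fun a b => decide (k a < k b)) (f x) acc)
          (acc.map f)
        = (S.foldl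
            (fun acc x => PySem.List.insertBy (fun a b => decide (k (f a) < k (f b))) x acc)
            acc).map f by
    simpa using h S []
  intro S
  induction S with
  | nil => intro acc; rfl
  | cons x S ih =>
    intro acc
    rw [List.foldl_cons, List.foldl_cons, insertBy_map f _ x acc, ih]

theorem A_nonempty (text : String) (i0 : Int) (rest : List Int)
    (h : hIdx (PySem.Str.splitlines text) 0 = i0 :: rest) :
    organize_text text =
      PySem.Str.join "\n" (popTrailing (parsePre (PySem.Str.splitlines text) ++
        (PySem.List.sorted (parseSecs (PySem.Str.splitlines text))
            (fun s => PySem.Str.strip (PySem.Str.slice s.1 (some 2) none)) false).flatMap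
          (fun s => [s.1] ++ PySem.List.sorted s.2 (fun x => x) false ++ [""]))) ++ "\n" := by
  simp only [organize_text]
  rw [show ((PySem.List.enumerate (PySem.Str.splitlines text) 0).filter
      (fun p => is_section_header p.2)).map (fun p => p.1)
      = hIdx (PySem.Str.splitlines text) 0 from rfl, h]
  dsimp only
  rw [slice_hIdx_head (PySem.Str.splitlines text) i0 rest h]
  rw [PySem.List.foldl_append_singleton_eq_map, List.nil_append]
  rw [zipNext0 (fun s e =>
      (PySem.List.pyGetD (PySem.Str.splitlines text) s "",
        PySem.List.sorted
          (List.filter (fun line => !(PySem.Str.strip line == ""))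
            (PySem.List.slice (PySem.Str.splitlines text) (some (s + 1)) (some e)))
          (fun x => x) false))
    ((PySem.Str.splitlines text).length : Int) (i0 :: rest)]
  rw [← h]
  rw [show (fun q : Int × Int =>
      (PySem.List.pyGetD (PySem.Str.splitlines text) q.1 "",
        PySem.List.sorted
          (List.filter (fun line => !(PySem.Str.strip line == ""))
            (PySem.List.slice (PySem.Str.splitlines text) (some (q.1 + 1)) (some q.2)))
          (fun x => x) false))
      = secOfA (PySem.Str.splitlines text) from rfl]
  rw [secsA (PySem.Str.splitlines text)]
  rw [sorted_map (fun s : String × List String =>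
      (s.1, PySem.List.sorted s.2 (fun x => x) false))
    (fun item => PySem.Str.strip (PySem.Str.slice item.1 (some 2) none))
    (parseSecs (PySem.Str.splitlines text))]
  rw [show (fun x : String × List String =>
      PySem.Str.strip (PySem.Str.slice (x.1, PySem.List.sorted x.2 (fun y => y) false).1
        (some 2) none))
      = (fun s : String × List String =>
          PySem.Str.strip (PySem.Str.slice s.1 (some 2) none)) from rfl]
  rw [show (fun (acc : List String) (hb : String × List String) =>
      acc ++ [hb.1] ++ hb.2 ++ [""])
      = (fun (acc : List String) (hb : String × List String) =>
          acc ++ ([hb.1] ++ hb.2 ++ [""])) from by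
    funext acc hb
    simp [List.append_assoc]]
  rw [PySem.List.foldl_append_eq_flatMap
    (g := fun hb : String × List String => [hb.1] ++ hb.2 ++ [""])]
  rw [List.flatMap_map]

theorem A_empty (text : String) (h : hIdx (PySem.Str.splitlines text) 0 = []) :
    organize_text text
      = (if PySem.Str.endswith text "\n" then text else text ++ "\n") := by
  simp only [organize_text]
  rw [show ((PySem.List.enumerate (PySem.Str.splitlines text) 0).filter
      (fun p => is_section_header p.2)).map (fun p => p.1)
      = hIdx (PySem.Str.splitlines text) 0 from rfl, h]

theorem B_empty (text : String)
    (hc : ((PySem.Str.splitlines text).foldl ot_step ([], [], none)).2.2 = none) :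
    organize_text_alt text
      = (if PySem.Str.endswith text "\n" then text else text ++ "\n") := by
  simp only [organize_text_alt]
  rw [hc]

theorem B_nonempty (text : String) (c : String × List String)
    (hc : ((PySem.Str.splitlines text).foldl ot_step ([], [], none)).2.2 = some c) :
    organize_text_alt text =
      PySem.Str.join "\n" (popTrailing (parsePre (PySem.Str.splitlines text) ++
        (PySem.List.sorted (parseSecs (PySem.Str.splitlines text))
            (fun s => PySem.Str.strip (PySem.Str.slice s.1 (some 2) none)) false).flatMap
          (fun s => [s.1] ++ PySem.List.sorted s.2 (fun x => x) false ++ [""]))) ++ "\n" := by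
  have hflat := fold_flat_none (PySem.Str.splitlines text) [] []
  have h1 : ((PySem.Str.splitlines text).foldl ot_step ([], [], none)).1
      = parsePre (PySem.Str.splitlines text) := by
    have := congrArg Prod.fst hflat
    simpa [otFlat] using this
  have h2 : ((PySem.Str.splitlines text).foldl ot_step ([], [], none)).2.1 ++ [c]
      = parseSecs (PySem.Str.splitlines text) := by
    have := congrArg (fun x => x.2.1) hflat
    simp only [otFlat, hc, Option.toList_some] at this
    simpa using this
  simp only [organize_text_alt]
  rw [hc]
  dsimp only
  rw [h1, h2]
  rfl

-- ===== VERDICT (by name: the statement is the Claim_ definition above) =====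
theorem organize_text_spec : Claim_equal_organize_text := by
  unfold Claim_equal_organize_text
  intro text _
  unfold Spec_organize_text
  have hflat := fold_flat_none (PySem.Str.splitlines text) [] []
  have h3 : ((PySem.Str.splitlines text).foldl ot_step ([], [], none)).2.2.isSome
      = !(parseSecs (PySem.Str.splitlines text)).isEmpty := by
    have := congrArg (fun x => x.2.2) hflat
    simpa [otFlat] using this
  by_cases hps : parseSecs (PySem.Str.splitlines text) = []
  · have hidx : hIdx (PySem.Str.splitlines text) 0 = [] :=
      (hIdx_nil_iff (PySem.Str.splitlines text)).mpr hps
    have hnone : ((PySem.Str.splitlines text).foldl ot_step ([], [], none)).2.2 = none := by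
      rw [hps] at h3
      simpa using Option.not_isSome_iff_eq_none.mp (by simp [h3])
    rw [A_empty text hidx, B_empty text hnone]
  · have hne : hIdx (PySem.Str.splitlines text) 0 ≠ [] := by
      rw [Ne, hIdx_nil_iff]; exact hps
    obtain ⟨i0, rest, hcons⟩ := List.exists_cons_of_ne_nil hne
    have hsome : ∃ c, ((PySem.Str.splitlines text).foldl ot_step ([], [], none)).2.2
        = some c := by
      cases o : ((PySem.Str.splitlines text).foldl ot_step ([], [], none)).2.2 with
      | none => rw [o] at h3; simp at h3; exact absurd h3 (by simpa using hps)
      | some c => exact ⟨c, rfl⟩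
    obtain ⟨c, hc⟩ := hsome
    rw [A_nonempty text i0 rest hcons, B_nonempty text c hc]
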